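-- pv_equiv track=rewrite | github.com/sharathkumar49/learning | Python programs/LeetCodeSolutions/2198.NumberofSingleDivisorTriplets.py | singleDivisorTriplet
-- ===== SOURCE A (Python) =====
-- def singleDivisorTriplet(nums):
--     n = len(nums)
--     res = 0
--     for i in range(n):
--         for j in range(i+1, n):
--             for k in range(j+1, n):
--                 s = nums[i]+nums[j]+nums[k]
--                 cnt = sum(s%x==0 for x in [nums[i],nums[j],nums[k]])
--                 if cnt == 1:
--                     res += 1
--     return res
-- ===== SOURCE B (Python) =====
-- def count1(a, b, c):
--     s = a + b + c
--     return (s % a == 0) + (s % b == 0) + (s % c == 0) == 1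
--
--
-- def singleDivisorTriplet(nums):
--     freq = {}
--     for x in nums:
--         freq[x] = freq.get(x, 0) + 1
--     vals = sorted(freq)
--     res = 0
--     for i, a in enumerate(vals):
--         fa = freq[a]
--         if fa >= 3 and count1(a, a, a):
--             res += fa * (fa - 1) * (fa - 2) // 6
--         tail = vals[i + 1:]
--         for j, b in enumerate(tail):
--             fb = freq[b]
--             if fa >= 2 and count1(a, a, b):
--                 res += fa * (fa - 1) // 2 * fb
--             if fb >= 2 and count1(a, b, b):
--                 res += fa * fb * (fb - 1) // 2
--             for c in tail[j + 1:]: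
--                 if count1(a, b, c):
--                     res += fa * fb * freq[c]
--     return res
-- ===== Notes on version B (the rewrite author's own statement) =====
-- stated objective: faster
-- what changed: A scans all O(n^3) index triples; B counts value frequencies in one pass over the list and then scans only distinct-value triples (with combinations of a value taken 2 or 3 times), weighting each by its combinatoric multiplicity, so duplicate-heavy inputs avoid the cubic scan over indices.
import Mathlib
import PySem

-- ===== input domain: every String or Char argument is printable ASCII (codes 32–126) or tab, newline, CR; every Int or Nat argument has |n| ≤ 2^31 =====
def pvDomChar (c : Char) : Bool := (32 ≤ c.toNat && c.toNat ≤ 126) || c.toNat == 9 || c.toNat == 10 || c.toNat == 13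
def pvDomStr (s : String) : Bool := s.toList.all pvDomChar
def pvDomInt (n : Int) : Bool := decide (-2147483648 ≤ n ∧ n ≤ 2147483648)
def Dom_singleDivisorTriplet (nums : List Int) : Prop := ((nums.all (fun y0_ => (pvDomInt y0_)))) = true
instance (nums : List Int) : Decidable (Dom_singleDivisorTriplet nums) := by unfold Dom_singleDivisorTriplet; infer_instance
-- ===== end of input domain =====

-- B replaces A's O(n^3) scan over index triples by frequency counting plus a scan over
-- distinct value triples weighted with combinatoric multiplicities (objective: faster).

-- ===== PORT A =====
def singleDivisorTriplet (nums : List Int) : Int :=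
  let n : Int := PySem.List.len nums
  (PySem.List.pyRange 0 n).foldl (fun res i =>
    (PySem.List.pyRange (i+1) n).foldl (fun res j =>
      (PySem.List.pyRange (j+1) n).foldl (fun res k =>
        let s := PySem.List.pyGetD nums i 0 + PySem.List.pyGetD nums j 0 + PySem.List.pyGetD nums k 0
        let cnt := ([PySem.List.pyGetD nums i 0, PySem.List.pyGetD nums j 0, PySem.List.pyGetD nums k 0].map
          (fun x => if PySem.Int.mod s x = 0 then (1:Int) else 0)).sum
        if cnt = 1 then res + 1 else res) res) res) 0

-- ===== PORT B =====
-- helper count1 of Source B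
def pvCount1 (a b c : Int) : Bool :=
  let s := a + b + c
  ((if PySem.Int.mod s a = 0 then (1:Int) else 0) + (if PySem.Int.mod s b = 0 then (1:Int) else 0) +
    (if PySem.Int.mod s c = 0 then (1:Int) else 0)) == 1

def singleDivisorTriplet_alt (nums : List Int) : Int :=
  let freq : PySem.Dict Int Int := nums.foldl (fun d x => d.insert x (d.getD x 0 + 1)) PySem.Dict.empty
  let vals : List Int := PySem.List.sorted freq.keys (fun v => v) false
  (PySem.List.enumerate vals).foldl (fun res p =>
    let i := p.1
    let a := p.2
    let fa := freq.getD a 0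
    let res := if 3 ≤ fa ∧ pvCount1 a a a = true then res + PySem.Int.floordiv (fa * (fa - 1) * (fa - 2)) 6 else res
    let tail := PySem.List.slice vals (some (i + 1)) none
    (PySem.List.enumerate tail).foldl (fun res q =>
      let j := q.1
      let b := q.2
      let fb := freq.getD b 0
      let res := if 2 ≤ fa ∧ pvCount1 a a b = true then res + PySem.Int.floordiv (fa * (fa - 1)) 2 * fb else res
      let res := if 2 ≤ fb ∧ pvCount1 a b b = true then res + PySem.Int.floordiv (fa * fb * (fb - 1)) 2 else res
      (PySem.List.slice tail (some (j + 1)) none).foldl (fun res c =>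
        if pvCount1 a b c = true then res + fa * fb * freq.getD c 0 else res) res) res) 0

-- ===== PRECONDITION & SPEC =====
-- Pre_ excludes exactly the inputs on which Python A raises ZeroDivisionError:
-- a list containing 0 with at least three elements (every element then occurs in some triple).
def Pre_singleDivisorTriplet (nums : List Int) : Prop := ¬ (0 ∈ nums ∧ 3 ≤ nums.length)
instance (nums : List Int) : Decidable (Pre_singleDivisorTriplet nums) := by
  unfold Pre_singleDivisorTriplet; infer_instance
def pvWitness_singleDivisorTriplet : List Int := [1, 2, 3]

def Spec_singleDivisorTriplet (nums : List Int) (out : Int) : Prop := out = singleDivisorTriplet_alt nums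
instance (nums : List Int) (out : Int) : Decidable (Spec_singleDivisorTriplet nums out) := by
  unfold Spec_singleDivisorTriplet; infer_instance

-- ===== CLAIM (what is proved, stated in full; the proofs are below) =====
def Claim_equal_singleDivisorTriplet : Prop := ∀ (nums : List Int), Dom_singleDivisorTriplet nums → Pre_singleDivisorTriplet nums → Spec_singleDivisorTriplet nums (singleDivisorTriplet nums)

-- ===== LEMMAS AND PROOFS =====

-- The mathematical middle layer: both ports are reduced to sums over "tails" of a list.
def pvSumTails (g : Int → List Int → Int) : List Int → Int
  | [] => 0
  | a :: t => g a t + pvSumTails g t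

def pvTF (F : Int → Int → List Int → Int) : Int → List Int → Int
  | acc, [] => acc
  | acc, a :: t => pvTF F (F acc a t) t

-- the triple test of A (definitionally A's inner expression)
def pvCnt3 (a b c : Int) : Int :=
  ([a, b, c].map (fun x => if PySem.Int.mod (a + b + c) x = 0 then (1:Int) else 0)).sum

def pvInd (a b c : Int) : Int := if pvCnt3 a b c = 1 then 1 else 0
def pvCW (a b : Int) (l : List Int) : Int := pvSumTails (fun c _ => pvInd a b c) l
def pvPC (a : Int) (l : List Int) : Int := pvSumTails (fun b t => pvCW a b t) l
def pvCT (l : List Int) : Int := pvSumTails (fun a t => pvPC a t) l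

def pvC2 : Nat → Nat
  | 0 => 0
  | n + 1 => pvC2 n + n
def pvC3 : Nat → Nat
  | 0 => 0
  | n + 1 => pvC3 n + pvC2 n

def pvW (nums : List Int) (v : Int) : Int := (nums.count v : Int)
def pvS1 (nums : List Int) (a b : Int) (l : List Int) : Int :=
  pvSumTails (fun c _ => pvW nums c * pvInd a b c) l
def pvS2 (nums : List Int) (a : Int) (l : List Int) : Int :=
  pvSumTails (fun b t => (pvC2 (nums.count b) : Int) * pvInd a b b + pvW nums b * pvS1 nums a b t) l
def pvGB (nums : List Int) (a : Int) (t : List Int) : Int :=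
  (pvC3 (nums.count a) : Int) * pvInd a a a + (pvC2 (nums.count a) : Int) * pvS1 nums a a t
    + pvW nums a * pvS2 nums a t
def pvBM (nums : List Int) (l : List Int) : Int := pvSumTails (pvGB nums) l

def pvRep (nums : List Int) (vs : List Int) : List Int :=
  vs.flatMap (fun v => List.replicate (nums.count v) v)

-- fold shape lemmas
theorem pvTF_add (F : Int → Int → List Int → Int) (g : Int → List Int → Int)
    (hF : ∀ acc a t, F acc a t = acc + g a t) :
    ∀ (l : List Int) (acc : Int), pvTF F acc l = acc + pvSumTails g l
  | [], acc => by simp [pvTF, pvSumTails]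
  | a :: t, acc => by
      rw [pvTF, hF, pvTF_add F g hF t, pvSumTails]; ring

theorem pvRangeBridge (xs : List Int) (F : Int → Int → List Int → Int) :
    ∀ (k : Nat) (s : Int), 0 ≤ s → xs.length ≤ s.toNat + k → ∀ acc,
      (PySem.List.pyRange s (PySem.List.len xs)).foldl
        (fun acc j => F acc (PySem.List.pyGetD xs j 0) (xs.drop (j+1).toNat)) acc
        = pvTF F acc (xs.drop s.toNat) := by
  intro k
  induction k with
  | zero =>
      intro s hs hk acc
      have hlen : (PySem.List.len xs) ≤ s := by simp [PySem.List.len]; omega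
      rw [PySem.List.pyRange_one_eq_nil hlen, List.drop_eq_nil_of_le (by omega)]
      rfl
  | succ k ih =>
      intro s hs hk acc
      by_cases h : (xs.length : Int) ≤ s
      · have hlen : (PySem.List.len xs) ≤ s := by simp [PySem.List.len]; omega
        rw [PySem.List.pyRange_one_eq_nil hlen, List.drop_eq_nil_of_le (by omega)]
        rfl
      · have h : s < (xs.length : Int) := lt_of_not_ge h
        have hslt : s < PySem.List.len xs := by simp [PySem.List.len]; omega
        have hlt : s.toNat < xs.length := by omega
        rw [PySem.List.pyRange_one_cons hslt, List.foldl_cons,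
          List.drop_eq_getElem_cons hlt, pvTF]
        have hget : PySem.List.pyGetD xs s 0 = xs[s.toNat] :=
          PySem.List.pyGetD_eq_getElem xs 0 hs (by exact_mod_cast h)
        have hdrop : (s + 1).toNat = s.toNat + 1 := by omega
        rw [hget, hdrop]
        have := ih (s + 1) (by omega) (by omega) (F acc xs[s.toNat] (xs.drop (s.toNat + 1)))
        rw [show ((s:Int) + 1).toNat = s.toNat + 1 from by omega] at this
        exact this

theorem pvRangeBridge' (xs : List Int) (F : Int → Int → List Int → Int) (s : Int) (hs : 0 ≤ s)
    (acc : Int) :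
    (PySem.List.pyRange s (PySem.List.len xs)).foldl
      (fun acc j => F acc (PySem.List.pyGetD xs j 0) (xs.drop (j+1).toNat)) acc
      = pvTF F acc (xs.drop s.toNat) :=
  pvRangeBridge xs F xs.length s hs (by omega) acc

theorem pvEnumBridge (vals : List Int) (F : Int → Int → List Int → Int) :
    ∀ (l : List Int) (s : Int), 0 ≤ s → vals.drop s.toNat = l → ∀ acc,
      (PySem.List.enumerate l s).foldl
        (fun acc p => F acc p.2 (PySem.List.slice vals (some (p.1 + 1)) none)) acc
        = pvTF F acc l := by
  intro l
  induction l with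
  | nil => intro s _ _ acc; rfl
  | cons a t ih =>
      intro s hs hdrop acc
      have hcons : PySem.List.enumerate (a :: t) s = (s, a) :: PySem.List.enumerate t (s + 1) := rfl
      rw [hcons, List.foldl_cons, pvTF]
      have hdt : vals.drop (s.toNat + 1) = t := by
        rw [← List.drop_drop, hdrop, List.drop_one, List.tail_cons]
      have hslice : PySem.List.slice vals (some (s + 1)) none = t := by
        rw [PySem.List.slice_from vals (by omega)]
        rw [show ((s:Int) + 1).toNat = s.toNat + 1 from by omega]
        exact hdt
      rw [hslice]
      exact ih (s + 1) (by omega)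
        (by rw [show ((s:Int) + 1).toNat = s.toNat + 1 from by omega]; exact hdt) _

-- ===== A = pvCT =====
theorem pvA_eq_ct (nums : List Int) : singleDivisorTriplet nums = pvCT nums := by
  have hinner : ∀ (a b jj : Int), 0 ≤ jj → ∀ res,
      (PySem.List.pyRange jj (PySem.List.len nums)).foldl
        (fun res k => if pvCnt3 a b (PySem.List.pyGetD nums k 0) = 1 then res + 1 else res) res
        = res + pvCW a b (nums.drop jj.toNat) := by
    intro a b jj hjj res
    have h := pvRangeBridge' nums (fun acc c _ => if pvCnt3 a b c = 1 then acc + 1 else acc) jj hjj res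
    exact h.trans (pvTF_add _ (fun c _ => pvInd a b c)
      (by intro acc c t; unfold pvInd; by_cases h : pvCnt3 a b c = 1 <;> simp [h]) _ res)
  have hmid : ∀ (a ii : Int), 0 ≤ ii → ∀ res,
      (PySem.List.pyRange ii (PySem.List.len nums)).foldl
        (fun res j =>
          (PySem.List.pyRange (j + 1) (PySem.List.len nums)).foldl
            (fun res k =>
              if pvCnt3 a (PySem.List.pyGetD nums j 0) (PySem.List.pyGetD nums k 0) = 1
              then res + 1 else res) res) res
        = res + pvPC a (nums.drop ii.toNat) := by
    intro a ii hii res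
    have hc := PySem.List.foldl_congr_mem (PySem.List.pyRange ii (PySem.List.len nums)) _
      (fun res j => res + pvCW a (PySem.List.pyGetD nums j 0) (nums.drop (j + 1).toNat)) res
      (by intro acc j hj
          have hij : ii ≤ j := (PySem.List.mem_pyRange_one.1 hj).1
          exact hinner a _ (j + 1) (by omega) acc)
    rw [hc]
    have h := pvRangeBridge' nums (fun acc b t => acc + pvCW a b t) ii hii res
    exact h.trans (pvTF_add _ (fun b t => pvCW a b t) (fun _ _ _ => rfl) _ res)
  show (PySem.List.pyRange 0 (PySem.List.len nums)).foldl
      (fun res i =>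
        (PySem.List.pyRange (i + 1) (PySem.List.len nums)).foldl
          (fun res j =>
            (PySem.List.pyRange (j + 1) (PySem.List.len nums)).foldl
              (fun res k =>
                if pvCnt3 (PySem.List.pyGetD nums i 0) (PySem.List.pyGetD nums j 0)
                    (PySem.List.pyGetD nums k 0) = 1
                then res + 1 else res) res) res) 0 = pvCT nums
  refine ((PySem.List.foldl_congr_mem _ _
      (fun res i => res + pvPC (PySem.List.pyGetD nums i 0) (nums.drop (i + 1).toNat)) 0 ?_).trans ?_)
  · intro acc i hi
    have h0i : 0 ≤ i := (PySem.List.mem_pyRange_one.1 hi).1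
    exact hmid _ (i + 1) (by omega) acc
  · have h := pvRangeBridge' nums (fun acc a t => acc + pvPC a t) 0 le_rfl 0
    simp only [Int.toNat_zero, List.drop_zero] at h
    exact h.trans ((pvTF_add _ (fun a t => pvPC a t) (fun _ _ _ => rfl) _ 0).trans (zero_add _))

-- small unfolding lemmas
theorem pvSumTails_cons (g : Int → List Int → Int) (a : Int) (t : List Int) :
    pvSumTails g (a :: t) = g a t + pvSumTails g t := rfl

theorem pvCount1_iff (a b c : Int) : pvCount1 a b c = true ↔ pvCnt3 a b c = 1 := by
  unfold pvCount1 pvCnt3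
  simp only [List.map_cons, List.map_nil, List.sum_cons, List.sum_nil, beq_iff_eq, add_zero,
    add_assoc]

theorem pvMul2 (c : Nat) : (c : Int) * ((c : Int) - 1) = 2 * (pvC2 c : Int) := by
  induction c with
  | zero => simp [pvC2]
  | succ n ih => push_cast [pvC2]; linear_combination ih

theorem pvMul6 (c : Nat) :
    (c : Int) * ((c : Int) - 1) * ((c : Int) - 2) = 6 * (pvC3 c : Int) := by
  induction c with
  | zero => simp [pvC3]
  | succ n ih => push_cast [pvC3]; linear_combination ih + 3 * pvMul2 n

theorem pvFd2 (x : Int) : PySem.Int.floordiv (2 * x) 2 = x := by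
  rw [PySem.Int.floordiv_eq_ediv_of_pos (by norm_num)]; omega

theorem pvFd6 (x : Int) : PySem.Int.floordiv (6 * x) 6 = x := by
  rw [PySem.Int.floordiv_eq_ediv_of_pos (by norm_num)]; omega

theorem pvC2_lt (c : Nat) (h : c < 2) : pvC2 c = 0 := by interval_cases c <;> rfl
theorem pvC3_lt (c : Nat) (h : c < 3) : pvC3 c = 0 := by interval_cases c <;> rfl

-- guard bridges: a Python guard `fk >= m and count1(...)` with its floordiv payload
theorem pvG3 (c : Nat) (a res : Int) :
    (if 3 ≤ (c : Int) ∧ pvCount1 a a a = true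
     then res + PySem.Int.floordiv ((c : Int) * ((c : Int) - 1) * ((c : Int) - 2)) 6 else res)
      = res + (pvC3 c : Int) * pvInd a a a := by
  unfold pvInd
  by_cases hp : pvCnt3 a a a = 1
  · have hb : pvCount1 a a a = true := (pvCount1_iff _ _ _).2 hp
    by_cases hc : 3 ≤ (c : Int)
    · rw [if_pos ⟨hc, hb⟩, pvMul6 c, pvFd6, if_pos hp, mul_one]
    · rw [if_neg (by tauto), if_pos hp, mul_one, pvC3_lt c (by omega)]; simp
  · have hb : ¬ pvCount1 a a a = true := fun h => hp ((pvCount1_iff _ _ _).1 h)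
    rw [if_neg (by tauto), if_neg hp, mul_zero, add_zero]

theorem pvG2a (ca cb : Nat) (a b res : Int) :
    (if 2 ≤ (ca : Int) ∧ pvCount1 a a b = true
     then res + PySem.Int.floordiv ((ca : Int) * ((ca : Int) - 1)) 2 * (cb : Int) else res)
      = res + (pvC2 ca : Int) * (cb : Int) * pvInd a a b := by
  unfold pvInd
  by_cases hp : pvCnt3 a a b = 1
  · have hb : pvCount1 a a b = true := (pvCount1_iff _ _ _).2 hp
    by_cases hc : 2 ≤ (ca : Int)
    · rw [if_pos ⟨hc, hb⟩, pvMul2 ca, pvFd2, if_pos hp, mul_one]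
    · rw [if_neg (by tauto), if_pos hp, mul_one, pvC2_lt ca (by omega)]; simp
  · have hb : ¬ pvCount1 a a b = true := fun h => hp ((pvCount1_iff _ _ _).1 h)
    rw [if_neg (by tauto), if_neg hp, mul_zero, add_zero]

theorem pvG2b (ca cb : Nat) (a b res : Int) :
    (if 2 ≤ (cb : Int) ∧ pvCount1 a b b = true
     then res + PySem.Int.floordiv ((ca : Int) * (cb : Int) * ((cb : Int) - 1)) 2 else res)
      = res + (ca : Int) * (pvC2 cb : Int) * pvInd a b b := by
  unfold pvInd
  by_cases hp : pvCnt3 a b b = 1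
  · have hb : pvCount1 a b b = true := (pvCount1_iff _ _ _).2 hp
    by_cases hc : 2 ≤ (cb : Int)
    · rw [if_pos ⟨hc, hb⟩,
        show (ca : Int) * (cb : Int) * ((cb : Int) - 1) = 2 * ((ca : Int) * (pvC2 cb : Int)) from by
          linear_combination (ca : Int) * pvMul2 cb,
        pvFd2, if_pos hp, mul_one]
    · rw [if_neg (by tauto), if_pos hp, mul_one, pvC2_lt cb (by omega)]; simp
  · have hb : ¬ pvCount1 a b b = true := fun h => hp ((pvCount1_iff _ _ _).1 h)
    rw [if_neg (by tauto), if_neg hp, mul_zero, add_zero]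

theorem pvFoldC (nums : List Int) (a b : Int) :
    ∀ (l : List Int) (acc : Int),
      l.foldl (fun res c =>
          if pvCount1 a b c = true
          then res + (nums.count a : Int) * (nums.count b : Int) * (nums.count c : Int) else res) acc
        = acc + (nums.count a : Int) * (nums.count b : Int) * pvS1 nums a b l
  | [], acc => by simp [pvS1, pvSumTails]
  | c :: t, acc => by
      rw [List.foldl_cons, pvFoldC nums a b t]
      unfold pvS1
      rw [pvSumTails_cons]
      unfold pvInd pvW
      by_cases h : pvCnt3 a b c = 1
      · rw [if_pos ((pvCount1_iff a b c).2 h), if_pos h]; ring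
      · rw [if_neg (fun hh => h ((pvCount1_iff a b c).1 hh)), if_neg h]; ring

theorem pvInnerSum (nums : List Int) (a : Int) :
    ∀ t : List Int,
      pvSumTails (fun b t2 => (pvC2 (nums.count a) : Int) * pvW nums b * pvInd a a b
          + pvW nums a * (pvC2 (nums.count b) : Int) * pvInd a b b
          + pvW nums a * pvW nums b * pvS1 nums a b t2) t
        = (pvC2 (nums.count a) : Int) * pvS1 nums a a t + pvW nums a * pvS2 nums a t
  | [] => by simp [pvSumTails, pvS1, pvS2]
  | b :: t => by
      rw [pvSumTails_cons, pvInnerSum nums a t]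
      unfold pvS1 pvS2
      rw [pvSumTails_cons, pvSumTails_cons]
      unfold pvS1
      ring

-- per-element body of B, with the dict lookups already evaluated to counts
theorem pvBq (nums : List Int) (a : Int) (t : List Int) (res : Int) (q : Int × Int) :
    (let b := q.2
     let fb : Int := (nums.count b : Int)
     let fa : Int := (nums.count a : Int)
     let r2 := if 2 ≤ fa ∧ pvCount1 a a b = true
               then res + PySem.Int.floordiv (fa * (fa - 1)) 2 * fb else res
     let r3 := if 2 ≤ fb ∧ pvCount1 a b b = true
               then r2 + PySem.Int.floordiv (fa * fb * (fb - 1)) 2 else r2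
     (PySem.List.slice t (some (q.1 + 1)) none).foldl
       (fun res c => if pvCount1 a b c = true then res + fa * fb * (nums.count c : Int) else res) r3)
      = res + ((pvC2 (nums.count a) : Int) * pvW nums q.2 * pvInd a a q.2
          + pvW nums a * (pvC2 (nums.count q.2) : Int) * pvInd a q.2 q.2
          + pvW nums a * pvW nums q.2 * pvS1 nums a q.2 (PySem.List.slice t (some (q.1 + 1)) none)) := by
  show (PySem.List.slice t (some (q.1 + 1)) none).foldl _ _ = _
  rw [pvFoldC nums a q.2 (PySem.List.slice t (some (q.1 + 1)) none), pvG2b, pvG2a]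
  unfold pvW
  ring

theorem pvBbody (nums : List Int) (acc a : Int) (t : List Int) :
    (let fa : Int := (nums.count a : Int)
     let r1 := if 3 ≤ fa ∧ pvCount1 a a a = true
               then acc + PySem.Int.floordiv (fa * (fa - 1) * (fa - 2)) 6 else acc
     (PySem.List.enumerate t).foldl
       (fun res q =>
         let b := q.2
         let fb : Int := (nums.count b : Int)
         let r2 := if 2 ≤ fa ∧ pvCount1 a a b = true
                   then res + PySem.Int.floordiv (fa * (fa - 1)) 2 * fb else res
         let r3 := if 2 ≤ fb ∧ pvCount1 a b b = true
                   then r2 + PySem.Int.floordiv (fa * fb * (fb - 1)) 2 else r2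
         (PySem.List.slice t (some (q.1 + 1)) none).foldl
           (fun res c => if pvCount1 a b c = true then res + fa * fb * (nums.count c : Int) else res)
           r3) r1)
      = acc + pvGB nums a t := by
  show (PySem.List.enumerate t).foldl _ _ = _
  refine ((PySem.List.foldl_congr_mem (PySem.List.enumerate t) _
      (fun res q => res + ((pvC2 (nums.count a) : Int) * pvW nums q.2 * pvInd a a q.2
        + pvW nums a * (pvC2 (nums.count q.2) : Int) * pvInd a q.2 q.2
        + pvW nums a * pvW nums q.2 * pvS1 nums a q.2 (PySem.List.slice t (some (q.1 + 1)) none)))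
      _ ?_).trans ?_)
  · intro res q _
    exact pvBq nums a t res q
  · refine ((pvEnumBridge t (fun res b t2 => res + ((pvC2 (nums.count a) : Int) * pvW nums b * pvInd a a b
        + pvW nums a * (pvC2 (nums.count b) : Int) * pvInd a b b
        + pvW nums a * pvW nums b * pvS1 nums a b t2)) t 0 le_rfl (by simp) _).trans ?_)
    refine ((pvTF_add _ (fun b t2 => (pvC2 (nums.count a) : Int) * pvW nums b * pvInd a a b
        + pvW nums a * (pvC2 (nums.count b) : Int) * pvInd a b b
        + pvW nums a * pvW nums b * pvS1 nums a b t2) (fun _ _ _ => rfl) t _).trans ?_)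
    rw [pvInnerSum nums a t, pvG3 (nums.count a) a acc]
    unfold pvGB
    ring

-- ===== B = pvBM over the sorted distinct values =====
theorem pvB_eq_bm (nums : List Int) :
    singleDivisorTriplet_alt nums
      = pvBM nums (PySem.List.sorted (PySem.Set.ofList nums) (fun v => v) false) := by
  unfold singleDivisorTriplet_alt
  simp only [PySem.Dict.foldl_insert_getD_add_one_eq_counter, PySem.Dict.keys_counter,
    PySem.Dict.getD_counter]
  refine ((PySem.List.foldl_congr_mem _ _
      (fun res p => res + pvGB nums p.2
        (PySem.List.slice (PySem.List.sorted (PySem.Set.ofList nums) (fun v => v) false)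
          (some (p.1 + 1)) none)) 0 ?_).trans ?_)
  · intro acc p _
    exact pvBbody nums acc p.2
      (PySem.List.slice (PySem.List.sorted (PySem.Set.ofList nums) (fun v => v) false)
        (some (p.1 + 1)) none)
  · refine ((pvEnumBridge _ (fun acc a t => acc + pvGB nums a t) _ 0 le_rfl (by simp) 0).trans ?_)
    exact (pvTF_add _ (pvGB nums) (fun _ _ _ => rfl) _ 0).trans (zero_add _)

-- ===== permutation and grouping =====
theorem pvCW_cons (a b c : Int) (t : List Int) : pvCW a b (c :: t) = pvInd a b c + pvCW a b t := rfl
theorem pvPC_cons (a b : Int) (t : List Int) : pvPC a (b :: t) = pvCW a b t + pvPC a t := rfl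
theorem pvCT_cons (a : Int) (t : List Int) : pvCT (a :: t) = pvPC a t + pvCT t := rfl

theorem pvCnt3_swap12 (a b c : Int) : pvCnt3 a b c = pvCnt3 b a c := by
  unfold pvCnt3
  simp only [List.map_cons, List.map_nil, List.sum_cons, List.sum_nil]
  rw [show b + a + c = a + b + c from by ring]
  ring

theorem pvCnt3_swap23 (a b c : Int) : pvCnt3 a b c = pvCnt3 a c b := by
  unfold pvCnt3
  simp only [List.map_cons, List.map_nil, List.sum_cons, List.sum_nil]
  rw [show a + c + b = a + b + c from by ring]
  ring

theorem pvInd_swap12 (a b c : Int) : pvInd a b c = pvInd b a c := by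
  unfold pvInd; rw [pvCnt3_swap12]
theorem pvInd_swap23 (a b c : Int) : pvInd a b c = pvInd a c b := by
  unfold pvInd; rw [pvCnt3_swap23]

theorem pvCW_eq_sum (a b : Int) (l : List Int) :
    pvCW a b l = (l.map (fun c => pvInd a b c)).sum := by
  induction l with
  | nil => rfl
  | cons c t ih => rw [pvCW_cons, List.map_cons, List.sum_cons, ih]

theorem pvCW_perm (a b : Int) {l l' : List Int} (h : l.Perm l') : pvCW a b l = pvCW a b l' := by
  rw [pvCW_eq_sum, pvCW_eq_sum]; exact (h.map _).sum_eq

theorem pvCW_sym (a b : Int) (l : List Int) : pvCW a b l = pvCW b a l := by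
  induction l with
  | nil => rfl
  | cons c t ih => rw [pvCW_cons, pvCW_cons, ih, pvInd_swap12]

theorem pvPC_perm (a : Int) {l l' : List Int} (h : l.Perm l') : pvPC a l = pvPC a l' := by
  induction h with
  | nil => rfl
  | cons x h ih => rw [pvPC_cons, pvPC_cons, ih, pvCW_perm a x h]
  | swap x y l =>
      rw [pvPC_cons, pvPC_cons, pvPC_cons, pvPC_cons, pvCW_cons, pvCW_cons,
        pvInd_swap23 a y x]
      ring
  | trans h1 h2 ih1 ih2 => rw [ih1, ih2]

theorem pvCT_perm {l l' : List Int} (h : l.Perm l') : pvCT l = pvCT l' := by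
  induction h with
  | nil => rfl
  | cons x h ih => rw [pvCT_cons, pvCT_cons, ih, pvPC_perm x h]
  | swap x y l =>
      rw [pvCT_cons, pvCT_cons, pvCT_cons, pvCT_cons, pvPC_cons, pvPC_cons, pvCW_sym x y l]
      ring
  | trans h1 h2 ih1 ih2 => rw [ih1, ih2]

theorem pvCW_rep (a b x : Int) : ∀ (f : Nat) (l : List Int),
    pvCW a b (List.replicate f x ++ l) = (f : Int) * pvInd a b x + pvCW a b l
  | 0, l => by simp
  | f + 1, l => by
      rw [List.replicate_succ, List.cons_append, pvCW_cons, pvCW_rep a b x f l]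
      push_cast; ring

theorem pvPC_rep (a b : Int) : ∀ (f : Nat) (l : List Int),
    pvPC a (List.replicate f b ++ l)
      = (pvC2 f : Int) * pvInd a b b + (f : Int) * pvCW a b l + pvPC a l
  | 0, l => by simp [pvC2]
  | f + 1, l => by
      rw [List.replicate_succ, List.cons_append, pvPC_cons, pvCW_rep a b b f l, pvPC_rep a b f l]
      push_cast [pvC2]; ring

theorem pvCT_rep (a : Int) : ∀ (f : Nat) (l : List Int),
    pvCT (List.replicate f a ++ l)
      = (pvC3 f : Int) * pvInd a a a + (pvC2 f : Int) * pvCW a a l + (f : Int) * pvPC a l + pvCT l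
  | 0, l => by simp [pvC2, pvC3]
  | f + 1, l => by
      rw [List.replicate_succ, List.cons_append, pvCT_cons, pvPC_rep a a f l, pvCT_rep a f l]
      push_cast [pvC2, pvC3]; ring

theorem pvCW_repAll (nums : List Int) (a b : Int) : ∀ vs, pvCW a b (pvRep nums vs) = pvS1 nums a b vs
  | [] => rfl
  | v :: t => by
      unfold pvRep
      rw [List.flatMap_cons, pvCW_rep a b v (nums.count v) _]
      unfold pvS1
      rw [pvSumTails_cons]
      unfold pvW
      exact congrArg _ (pvCW_repAll nums a b t)

theorem pvPC_repAll (nums : List Int) (a : Int) : ∀ vs, pvPC a (pvRep nums vs) = pvS2 nums a vs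
  | [] => rfl
  | v :: t => by
      unfold pvRep
      rw [List.flatMap_cons, pvPC_rep a v (nums.count v) _]
      unfold pvS2
      rw [pvSumTails_cons]
      unfold pvW
      rw [show (t.flatMap fun v => List.replicate (nums.count v) v) = pvRep nums t from rfl,
        pvPC_repAll nums a t, pvCW_repAll nums a v t]
      rfl

theorem pvCT_repAll (nums : List Int) : ∀ vs, pvCT (pvRep nums vs) = pvBM nums vs
  | [] => rfl
  | v :: t => by
      unfold pvRep
      rw [List.flatMap_cons, pvCT_rep v (nums.count v) _]
      unfold pvBM
      rw [pvSumTails_cons]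
      unfold pvGB pvW
      rw [show (t.flatMap fun v => List.replicate (nums.count v) v) = pvRep nums t from rfl,
        pvCT_repAll nums t, pvPC_repAll nums v t, pvCW_repAll nums v v t]
      rfl

theorem pvCount_rep (nums : List Int) : ∀ (vs : List Int), vs.Nodup → ∀ x : Int,
    (pvRep nums vs).count x = if x ∈ vs then nums.count x else 0
  | [], _, x => by simp [pvRep]
  | v :: t, h, x => by
      unfold pvRep
      rw [List.flatMap_cons, List.count_append, List.count_replicate]
      have ih := pvCount_rep nums t (List.Nodup.of_cons h) x
      rw [show (t.flatMap fun v => List.replicate (nums.count v) v) = pvRep nums t from rfl, ih]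
      by_cases hx : x = v
      · subst hx
        have hnx : x ∉ t := (List.nodup_cons.1 h).1
        simp [hnx]
      · simp [hx, Ne.symm hx, List.mem_cons]

theorem pvPerm (nums vs : List Int) (hnd : vs.Nodup) (hmem : ∀ x, x ∈ vs ↔ x ∈ nums) :
    nums.Perm (pvRep nums vs) := by
  rw [List.perm_iff_count]
  intro x
  rw [pvCount_rep nums vs hnd x]
  by_cases hx : x ∈ vs
  · simp [hx]
  · have hxn : x ∉ nums := fun h => hx ((hmem x).2 h)
    simp [hx, List.count_eq_zero.2 hxn]

theorem pvFinal (nums : List Int) : pvCT nums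
    = pvBM nums (PySem.List.sorted (PySem.Set.ofList nums) (fun v => v) false) := by
  have hperm := PySem.List.sorted_perm (PySem.Set.ofList nums) (fun v => v) false
  have hnd : (PySem.List.sorted (PySem.Set.ofList nums) (fun v => v) false).Nodup :=
    hperm.nodup_iff.mpr (PySem.Set.nodup_ofList nums)
  have hmem : ∀ x, x ∈ PySem.List.sorted (PySem.Set.ofList nums) (fun v => v) false ↔ x ∈ nums :=
    fun x => (PySem.List.mem_sorted _ _ _ x).trans (PySem.Set.mem_ofList nums x)
  rw [pvCT_perm (pvPerm nums _ hnd hmem), pvCT_repAll]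

-- ===== VERDICT (by name: the statement is the Claim_ definition above) =====
theorem singleDivisorTriplet_spec : Claim_equal_singleDivisorTriplet := by
  intro nums _ _
  unfold Spec_singleDivisorTriplet
  rw [pvA_eq_ct, pvB_eq_bm, pvFinal]
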